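-- pv_equiv track=rewrite | github.com/JakinChan200/2048 | botLib.py | to_c_board
-- ===== SOURCE A (Python) =====
-- powerDict = {
--     "" : 0,
--     "2": 1,
--     "4": 2,
--     "8": 3,
--     "16": 4,
--     "32": 5,
--     "64": 6,
--     "128": 7,
--     "256": 8,
--     "512": 9,
--     "1024": 10,
--     "2048": 11,
--     "4096": 12,
--     "8192": 13,
--     "16384": 14,
--     "32768": 15
-- }
--
-- def to_c_board(m):
--     board = 0
--     i = 0
--     for row in m:
--         for c in row:
--             board |= int(powerDict[c]) << (4*i)
--             i += 1
--     return board
-- ===== SOURCE B (Python) =====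
-- powerDict = {
--     "" : 0,
--     "2": 1,
--     "4": 2,
--     "8": 3,
--     "16": 4,
--     "32": 5,
--     "64": 6,
--     "128": 7,
--     "256": 8,
--     "512": 9,
--     "1024": 10,
--     "2048": 11,
--     "4096": 12,
--     "8192": 13,
--     "16384": 14,
--     "32768": 15
-- }
--
-- def pack(vals, lo, hi):
--     # divide and conquer: the bitfield of a block is the bitfield of its left
--     # half OR'ed with the bitfield of its right half shifted past it
--     if hi - lo <= 1:
--         return vals[lo] if hi - lo == 1 else 0
--     mid = (lo + hi) // 2
--     return pack(vals, lo, mid) | pack(vals, mid, hi) << (4 * (mid - lo))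
--
-- def to_c_board(m):
--     vals = [powerDict[c] for row in m for c in row]
--     return pack(vals, 0, len(vals))
-- ===== Notes on version B (the rewrite author's own statement) =====
-- stated objective: alternative
-- what changed: Replaces the single indexed shift-and-OR scan by a two-stage scheme: first flatten the board to a list of nibble values, then combine them by recursive divide-and-conquer, OR-ing the left half's bitfield with the right half's bitfield shifted past it.
import Mathlib
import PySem

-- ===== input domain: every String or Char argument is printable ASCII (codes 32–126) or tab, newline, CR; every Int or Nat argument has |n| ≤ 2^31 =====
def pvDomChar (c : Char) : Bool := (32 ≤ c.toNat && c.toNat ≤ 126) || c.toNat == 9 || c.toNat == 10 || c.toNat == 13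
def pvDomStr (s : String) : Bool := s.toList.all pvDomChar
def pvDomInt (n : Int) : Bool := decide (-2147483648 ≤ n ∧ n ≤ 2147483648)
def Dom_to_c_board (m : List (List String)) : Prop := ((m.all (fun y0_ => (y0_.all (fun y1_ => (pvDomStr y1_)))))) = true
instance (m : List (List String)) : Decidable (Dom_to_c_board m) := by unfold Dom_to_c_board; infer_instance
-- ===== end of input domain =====

-- B replaces A's single indexed shift-and-OR scan by two stages: flatten the board
-- to a list of nibble values, then combine them by recursive divide-and-conquer
-- (left half OR right half shifted past it); objective: alternative.

def powerDict : PySem.Dict String Int := PySem.Dict.ofList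
  [("", 0), ("2", 1), ("4", 2), ("8", 3), ("16", 4), ("32", 5), ("64", 6), ("128", 7),
   ("256", 8), ("512", 9), ("1024", 10), ("2048", 11), ("4096", 12), ("8192", 13),
   ("16384", 14), ("32768", 15)]

-- powerDict[c]; Python raises KeyError on a missing key (excluded by Pre_), the port returns 0 there
def pvVal (c : String) : Int := (PySem.Dict.get? powerDict c).getD 0

-- ===== PORT A =====
def to_c_board (m : List (List String)) : Int :=
  (m.foldl (fun (s : Int × Nat) row =>
      row.foldl (fun (s : Int × Nat) c =>
        (PySem.Int.bor s.1 ((pvVal c) <<< (4 * s.2)), s.2 + 1)) s)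
    ((0 : Int), (0 : Nat))).1

-- ===== PORT B =====
-- the recursive binary merge of Source B; the shift amount 4*(mid-lo) is nonnegative in
-- every reached call, so '.toNat' on it is exact
def pack (vals : List Int) (lo hi : Int) : Int :=
  if hi - lo ≤ 1 then
    (if hi - lo = 1 then PySem.List.pyGetD vals lo 0 else 0)
  else
    let mid := PySem.Int.floordiv (lo + hi) 2
    PySem.Int.bor (pack vals lo mid) ((pack vals mid hi) <<< (4 * (mid - lo)).toNat)
termination_by (hi - lo).toNat
decreasing_by
  all_goals
    simp only [not_le] at *
    rw [PySem.Int.floordiv_eq_ediv_of_pos (by omega)]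
    omega

def to_c_board_alt (m : List (List String)) : Int :=
  let vals := m.flatMap (fun row => row.map pvVal)
  pack vals 0 vals.length

-- ===== PRECONDITION & SPEC =====
-- Pre_ excludes boards containing a cell that is not a key of powerDict: Python A raises KeyError there.
def Pre_to_c_board (m : List (List String)) : Prop :=
  (m.all (fun row => row.all (fun c => PySem.Dict.contains powerDict c))) = true
instance (m : List (List String)) : Decidable (Pre_to_c_board m) := by unfold Pre_to_c_board; infer_instance
def pvWitness_to_c_board : List (List String) := [["", "2"], ["16", "32768"]]

def Spec_to_c_board (m : List (List String)) (out : Int) : Prop := out = to_c_board_alt m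
instance (m : List (List String)) (out : Int) : Decidable (Spec_to_c_board m out) := by unfold Spec_to_c_board; infer_instance

-- ===== CLAIM (what is proved, stated in full; the proofs are below) =====
def Claim_equal_to_c_board : Prop := ∀ (m : List (List String)), Dom_to_c_board m → Pre_to_c_board m → Spec_to_c_board m (to_c_board m)

-- ===== LEMMAS AND PROOFS =====

-- little-endian base-16 value of a list of nibble values: the common value of both ports
def segVal : List Int → Int
  | [] => 0
  | v :: vs => v + 16 * segVal vs

theorem segVal_append (a b : List Int) :
    segVal (a ++ b) = segVal a + 16 ^ a.length * segVal b := by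
  induction a with
  | nil => simp [segVal]
  | cons v vs ih =>
    simp only [List.cons_append, segVal, List.length_cons, pow_succ, ih]
    ring

theorem pvVal_bounds (c : String) : 0 ≤ pvVal c ∧ pvVal c ≤ 15 := by
  unfold pvVal
  cases h : PySem.Dict.get? powerDict c with
  | none => simp
  | some v =>
    have hv := PySem.Dict.mem_items_of_get?_eq_some powerDict h
    simp only [powerDict, PySem.Dict.ofList] at hv
    simp only [Option.getD_some]
    fin_cases hv <;> simp

theorem segVal_bounds (l : List Int) (hB : ∀ v ∈ l, 0 ≤ v ∧ v ≤ 15) :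
    0 ≤ segVal l ∧ segVal l < 16 ^ l.length := by
  induction l with
  | nil => simp [segVal]
  | cons v vs ih =>
    have hv := hB v (List.mem_cons_self)
    have ihv := ih (fun x hx => hB x (List.mem_cons_of_mem v hx))
    simp only [segVal, List.length_cons, pow_succ]
    constructor <;> nlinarith [ihv.1, ihv.2, hv.1, hv.2]

-- disjoint-nibble OR is addition
theorem bor_shift (b v : Int) (i : Nat) (hb0 : 0 ≤ b) (hb : b < 16 ^ i) (hv0 : 0 ≤ v) :
    PySem.Int.bor b (v <<< (4 * i)) = b + v * 16 ^ i := by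
  obtain ⟨bn, rfl⟩ := Int.eq_ofNat_of_zero_le hb0
  obtain ⟨vn, rfl⟩ := Int.eq_ofNat_of_zero_le hv0
  have hsh : ((vn : Int) <<< (4 * i)) = ((vn <<< (4 * i) : Nat) : Int) := by
    simp [Int.shiftLeft_eq, Nat.shiftLeft_eq, pow_mul]
  rw [hsh, PySem.Int.bor_natCast]
  have hbn : bn < 2 ^ (4 * i) := by
    have : ((16:Int) ^ i) = ((2 ^ (4 * i) : Nat) : Int) := by
      push_cast [pow_mul]; norm_num
    rw [this] at hb
    exact_mod_cast hb
  have := Nat.shiftLeft_add_eq_or_of_lt (b := bn) (a := vn) (i := 4 * i) hbn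
  rw [Nat.lor_comm] at this
  rw [← this]
  push_cast [Nat.shiftLeft_eq, pow_mul]
  ring

-- A's inner loop over one row
theorem foldA_row (cs : List String) (b : Int) (i : Nat)
    (hb0 : 0 ≤ b) (hb : b < 16 ^ i) :
    cs.foldl (fun (s : Int × Nat) c =>
        (PySem.Int.bor s.1 ((pvVal c) <<< (4 * s.2)), s.2 + 1)) (b, i)
      = (b + 16 ^ i * segVal (cs.map pvVal), i + cs.length) := by
  induction cs generalizing b i with
  | nil => simp [segVal]
  | cons c cs ih =>
    have hv := pvVal_bounds c
    have hp : (0:Int) < 16 ^ i := by positivity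
    simp only [List.foldl_cons]
    rw [bor_shift b (pvVal c) i hb0 hb hv.1]
    rw [ih (b + pvVal c * 16 ^ i) (i + 1) (by nlinarith) (by rw [pow_succ]; nlinarith)]
    simp only [Prod.mk.injEq, segVal, List.map_cons, List.length_cons]
    constructor
    · rw [pow_succ]; ring
    · omega

-- A's outer loop: the accumulator collects the little-endian value of the flattened board
theorem foldA (m : List (List String)) (b : Int) (i : Nat)
    (hb0 : 0 ≤ b) (hb : b < 16 ^ i) :
    m.foldl (fun (s : Int × Nat) row =>
        row.foldl (fun (s : Int × Nat) c =>
          (PySem.Int.bor s.1 ((pvVal c) <<< (4 * s.2)), s.2 + 1)) s) (b, i)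
      = (b + 16 ^ i * segVal (m.flatMap (fun row => row.map pvVal)),
         i + (m.map List.length).sum) := by
  induction m generalizing b i with
  | nil => simp [segVal]
  | cons row rs ih =>
    have hp : (0:Int) < 16 ^ i := by positivity
    have hrb := segVal_bounds (row.map pvVal)
      (by intro v hv; obtain ⟨c, _, rfl⟩ := List.mem_map.mp hv; exact pvVal_bounds c)
    simp only [List.foldl_cons]
    rw [foldA_row row b i hb0 hb]
    rw [ih (b + 16 ^ i * segVal (row.map pvVal)) (i + row.length)
        (by nlinarith [hrb.1]) (by rw [pow_add]; simp only [List.length_map] at hrb; nlinarith [hrb.2])]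
    simp only [Prod.mk.injEq, List.flatMap_cons, segVal_append, List.map_cons,
      List.sum_cons, pow_add, List.length_map]
    constructor
    · ring
    · omega

-- B's divide-and-conquer equals the little-endian value of the addressed segment
theorem pack_eq (vals : List Int) (hB : ∀ v ∈ vals, 0 ≤ v ∧ v ≤ 15) :
    ∀ (n : Nat) (lo hi : Int), (hi - lo).toNat ≤ n → 0 ≤ lo → lo ≤ hi → hi ≤ vals.length →
      pack vals lo hi = segVal ((vals.drop lo.toNat).take (hi - lo).toNat) := by
  intro n
  induction n with
  | zero =>
    intro lo hi hn h0 hlh _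
    have : hi = lo := by omega
    subst this
    rw [pack]
    simp [segVal]
  | succ n ih =>
    intro lo hi hn h0 hlh hhi
    rw [pack]
    by_cases hle : hi - lo ≤ 1
    · by_cases heq : hi - lo = 1
      · have hlt : lo.toNat < vals.length := by omega
        simp only [if_pos hle, if_pos heq]
        rw [PySem.List.pyGetD_eq_getElem vals 0 h0 (by omega), heq]
        have h1 : List.take (Int.toNat 1) (List.drop lo.toNat vals) = [vals[lo.toNat]] := by
          rw [List.drop_eq_getElem_cons hlt]
          rfl
        rw [h1]
        simp [segVal]
      · have : hi = lo := by omega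
        simp only [hle, if_true, heq, if_false]
        simp [this, segVal]
    · simp only [hle, if_false]
      have h2 : 2 ≤ hi - lo := by omega
      have hmid : lo + 1 ≤ PySem.Int.floordiv (lo + hi) 2 ∧
          PySem.Int.floordiv (lo + hi) 2 ≤ hi - 1 := by
        rw [PySem.Int.floordiv_eq_ediv_of_pos (by omega)]
        omega
      set mid := PySem.Int.floordiv (lo + hi) 2 with hmiddef
      have hL := ih lo mid (by omega) h0 (by omega) (by omega)
      have hR := ih mid hi (by omega) (by omega) (by omega) hhi
      rw [hL, hR]
      have hsegB : ∀ (l : List Int), (∀ v ∈ l, 0 ≤ v ∧ v ≤ 15) → 0 ≤ segVal l ∧ segVal l < 16 ^ l.length :=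
        fun l h => segVal_bounds l h
      have hmemL : ∀ v ∈ (vals.drop lo.toNat).take (mid - lo).toNat, 0 ≤ v ∧ v ≤ 15 :=
        fun v hv => hB v (List.mem_of_mem_drop (List.mem_of_mem_take hv))
      have hmemR : ∀ v ∈ (vals.drop mid.toNat).take (hi - mid).toNat, 0 ≤ v ∧ v ≤ 15 :=
        fun v hv => hB v (List.mem_of_mem_drop (List.mem_of_mem_take hv))
      have hLb := hsegB _ hmemL
      have hlen : ((vals.drop lo.toNat).take (mid - lo).toNat).length = (mid - lo).toNat := by
        simp only [List.length_take, List.length_drop]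
        omega
      have hsh : (4 * (mid - lo)).toNat = 4 * (mid - lo).toNat := by omega
      rw [hsh, bor_shift _ _ _ hLb.1 (by simpa [hlen] using hLb.2) (hsegB _ hmemR).1]
      have hsplit : (vals.drop lo.toNat).take (hi - lo).toNat
          = (vals.drop lo.toNat).take (mid - lo).toNat
            ++ (vals.drop mid.toNat).take (hi - mid).toNat := by
        have h1 : (hi - lo).toNat = (mid - lo).toNat + (hi - mid).toNat := by omega
        have h2 : vals.drop mid.toNat = (vals.drop lo.toNat).drop (mid - lo).toNat := by
          rw [List.drop_drop]
          congr 1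
          omega
        rw [h1, List.take_add, h2]
      rw [hsplit, segVal_append, hlen]
      ring

theorem flat_bounds (m : List (List String)) :
    ∀ v ∈ m.flatMap (fun row => row.map pvVal), 0 ≤ v ∧ v ≤ 15 := by
  intro v hv
  obtain ⟨row, _, hvr⟩ := List.mem_flatMap.mp hv
  obtain ⟨c, _, rfl⟩ := List.mem_map.mp hvr
  exact pvVal_bounds c

-- ===== VERDICT (by name: the statement is the Claim_ definition above) =====
theorem to_c_board_spec : Claim_equal_to_c_board := by
  intro m _ _
  unfold Spec_to_c_board to_c_board to_c_board_alt
  rw [foldA m 0 0 (by norm_num) (by norm_num)]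
  simp only []
  rw [pack_eq _ (flat_bounds m) (m.flatMap (fun row => row.map pvVal)).length 0
      ((m.flatMap (fun row => row.map pvVal)).length : Int)
      (by omega) (by omega) (by exact_mod_cast Int.natCast_nonneg _) (by omega)]
  have h1 : (((m.flatMap (fun row => row.map pvVal)).length : Int) - 0).toNat
      = (m.flatMap (fun row => row.map pvVal)).length := by omega
  rw [h1, Int.toNat_zero, List.drop_zero, List.take_length]
  ring
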